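-- pv_equiv track=rewrite | github.com/eHealthAfrica/aether | gather2-core/gather2/core/api/utils.py | get_entity_requirements
-- ===== SOURCE A (Python) =====
-- def get_entity_requirements(entities, field_mappings):
--     all_requirements = {}
--     for entity_type, entity_definition in entities.items():
--         entity_requirements = {}
--         # find mappings that start with the entity name
--         # and return a list with the entity_type ( and dot ) removed from the destination
--         matching_mappings = [[src, dst.split(entity_type+".")[1]]
--                              for src, dst in field_mappings
--                              if dst.startswith(entity_type+".")]
--         for field in entity_definition:
--             # filter again to find sources pertaining to this particular field in this entity
--             field_sources = [src for src, dst in matching_mappings if dst == field]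
--             entity_requirements[field] = field_sources
--         all_requirements[entity_type] = entity_requirements
--     return all_requirements
-- ===== SOURCE B (Python) =====
-- def get_entity_requirements(entities, field_mappings):
--     result = {}
--     for entity_type, entity_definition in entities.items():
--         prefix = entity_type + "."
--         # pre-initialize every field with no sources, then a single pass over the
--         # mappings appends each matching source directly into its field's slot
--         requirements = {field: [] for field in entity_definition}
--         for src, dst in field_mappings:
--             if dst.startswith(prefix):
--                 suffix = dst.split(prefix)[1]
--                 if suffix in requirements:
--                     requirements[suffix].append(src)
--         result[entity_type] = requirements
--     return result
-- ===== Notes on version B (the rewrite author's own statement) =====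
-- stated objective: alternative
-- what changed: A pre-filters mappings per entity and then rescans that list once per field; B inverts the loops: it pre-initializes the per-entity dict with every field mapped to [] and makes one pass over the mappings, appending each matching source directly into its field's slot, so the per-field scans and the intermediate matching_mappings list disappear (fewer passes, not measured faster).
import Mathlib
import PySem

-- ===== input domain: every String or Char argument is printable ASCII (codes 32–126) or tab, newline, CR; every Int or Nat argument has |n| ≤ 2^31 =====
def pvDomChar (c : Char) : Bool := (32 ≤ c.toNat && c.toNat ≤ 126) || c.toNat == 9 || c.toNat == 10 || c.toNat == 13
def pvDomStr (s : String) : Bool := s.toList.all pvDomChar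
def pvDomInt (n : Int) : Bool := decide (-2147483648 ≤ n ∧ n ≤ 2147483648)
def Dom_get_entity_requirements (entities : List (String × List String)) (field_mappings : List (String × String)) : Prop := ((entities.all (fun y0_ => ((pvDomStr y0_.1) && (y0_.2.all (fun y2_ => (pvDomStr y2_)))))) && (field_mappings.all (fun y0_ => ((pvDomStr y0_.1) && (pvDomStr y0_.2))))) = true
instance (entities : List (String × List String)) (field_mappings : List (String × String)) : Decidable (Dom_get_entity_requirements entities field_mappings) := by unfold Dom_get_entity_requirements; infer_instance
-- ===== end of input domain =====

-- ===== PORT A =====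
-- B inverts A's inner loops: it pre-initializes the per-entity dict with every field ↦ []
-- and makes a single pass over the mappings, appending each matching source into its
-- field's slot, instead of A's per-field rescans of a pre-filtered matching list.
-- shared helper: dst.split(entity_type+".")[1] — the prefix is never empty (it ends in "."),
-- and the startswith guard in both programs guarantees index 1 exists, so the defaults are unreachable
def pvSuffix (dst pre : String) : String := PySem.List.pyGetD ((PySem.Str.split? dst pre).getD []) 1 ""

-- matching_mappings = [[src, dst.split(entity_type+".")[1]] for src, dst in field_mappings if dst.startswith(entity_type+".")]
def pvA_matching (field_mappings : List (String × String)) (pre : String) : List (String × String) :=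
  field_mappings.foldl (fun acc sd =>
    if PySem.Str.startswith sd.2 pre then acc ++ [(sd.1, pvSuffix sd.2 pre)] else acc) []

-- field_sources = [src for src, dst in matching_mappings if dst == field]
def pvA_sources (matching : List (String × String)) (field : String) : List String :=
  matching.foldl (fun acc p => if p.2 == field then acc ++ [p.1] else acc) []

-- the 'for field in entity_definition' loop filling entity_requirements
def pvA_req (fields : List String) (matching : List (String × String)) : PySem.Dict String (List String) :=
  fields.foldl (fun r field => r.insert field (pvA_sources matching field)) PySem.Dict.empty

def get_entity_requirements (entities : List (String × List String)) (field_mappings : List (String × String)) : List (String × List (String × List String)) :=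
  (entities.foldl (fun (all : PySem.Dict String (List (String × List String))) ed =>
    all.insert ed.1 (pvA_req ed.2 (pvA_matching field_mappings (ed.1 ++ "."))).items)
    PySem.Dict.empty).items

-- ===== PORT B =====
-- requirements = {field: [] for field in entity_definition}
def pvB_init (fields : List String) : PySem.Dict String (List String) :=
  fields.foldl (fun d f => d.insert f ([] : List String)) PySem.Dict.empty

-- the 'for src, dst in field_mappings' loop: append src to requirements[suffix] when present
def pvB_fill (pre : String) : PySem.Dict String (List String) → List (String × String) → PySem.Dict String (List String)
  | req, [] => req
  | req, sd :: rest =>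
    pvB_fill pre
      (if PySem.Str.startswith sd.2 pre then
        (if req.contains (pvSuffix sd.2 pre)
         then req.modify (pvSuffix sd.2 pre) [] (fun l => l ++ [sd.1])
         else req)
       else req) rest

-- the outer 'for entity_type, entity_definition in entities.items()' loop
def pvB_main (field_mappings : List (String × String)) :
    List (String × List String) → PySem.Dict String (List (String × List String)) → PySem.Dict String (List (String × List String))
  | [], result => result
  | ed :: rest, result =>
    pvB_main field_mappings rest
      (result.insert ed.1 (pvB_fill (ed.1 ++ ".") (pvB_init ed.2) field_mappings).items)

def get_entity_requirements_alt (entities : List (String × List String)) (field_mappings : List (String × String)) : List (String × List (String × List String)) :=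
  (pvB_main field_mappings entities PySem.Dict.empty).items

-- ===== PRECONDITION & SPEC =====
def Spec_get_entity_requirements (entities : List (String × List String)) (field_mappings : List (String × String)) (out : List (String × List (String × List String))) : Prop := out = get_entity_requirements_alt entities field_mappings
instance (entities : List (String × List String)) (field_mappings : List (String × String)) (out : List (String × List (String × List String))) : Decidable (Spec_get_entity_requirements entities field_mappings out) := by unfold Spec_get_entity_requirements; infer_instance

-- ===== CLAIM (what is proved, stated in full; the proofs are below) =====
def Claim_equal_get_entity_requirements : Prop := ∀ (entities : List (String × List String)) (field_mappings : List (String × String)), Dom_get_entity_requirements entities field_mappings → Spec_get_entity_requirements entities field_mappings (get_entity_requirements entities field_mappings)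

-- ===== LEMMAS AND PROOFS =====

-- the matching sources for a field, in mapping order (both programs compute this)
def pvSrcs (fms : List (String × String)) (pre field : String) : List String :=
  (fms.filter (fun sd => PySem.Str.startswith sd.2 pre && (pvSuffix sd.2 pre == field))).map (·.1)

-- A's per-field scan of the pre-filtered list is exactly pvSrcs
theorem pvA_sources_eq (fms : List (String × String)) (pre field : String) :
    pvA_sources (pvA_matching fms pre) field = pvSrcs fms pre field := by
  unfold pvA_sources pvA_matching pvSrcs
  rw [PySem.List.foldl_append_if, PySem.List.foldl_append_if]
  simp [List.filter_map, List.filter_filter, Function.comp_def, Bool.and_comm]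

-- a fold inserting a key-determined value, looked up
theorem pv_foldl_insert_getD (g : String → List String) (field : String) :
    ∀ (fields : List String) (d : PySem.Dict String (List String)),
    (fields.foldl (fun d f => d.insert f (g f)) d).getD field []
      = if field ∈ fields then g field else d.getD field []
  | [], d => by simp
  | f :: fs, d => by
    rw [List.foldl_cons, pv_foldl_insert_getD g field fs]
    by_cases h : field ∈ fs
    · simp [h]
    · by_cases hf : field = f <;> simp [h, hf, PySem.Dict.getD_insert]

-- a fold inserting key-determined values, membership
theorem pv_foldl_insert_contains (g : String → List String) (field : String) :
    ∀ (fields : List String) (d : PySem.Dict String (List String)),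
    (fields.foldl (fun d f => d.insert f (g f)) d).contains field
      = (decide (field ∈ fields) || d.contains field)
  | [], d => by simp
  | f :: fs, d => by
    rw [List.foldl_cons, pv_foldl_insert_contains g field fs]
    by_cases hf : field = f <;>
      cases hdc : d.contains field <;> simp [hf, PySem.Dict.contains_insert, hdc]

-- B's fill loop never changes the key list either
theorem pvB_fill_keys (pre : String) :
    ∀ (fms : List (String × String)) (req : PySem.Dict String (List String)),
    (pvB_fill pre req fms).keys = req.keys
  | [], req => rfl
  | sd :: rest, req => by
    rw [pvB_fill, pvB_fill_keys pre rest]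
    split_ifs with h1 h2
    · rw [PySem.Dict.keys_modify]; exact PySem.Dict.keys_insert_of_contains _ _ h2
    · rfl
    · rfl

-- fill, looked up at a PRESENT key, appends exactly the matching sources in order
theorem pvB_fill_getD_pos (pre field : String) :
    ∀ (fms : List (String × String)) (req : PySem.Dict String (List String)),
    req.contains field = true →
    (pvB_fill pre req fms).getD field [] = req.getD field [] ++ pvSrcs fms pre field
  | [], req, _ => by simp [pvB_fill, pvSrcs]
  | sd :: rest, req, h => by
    rw [pvB_fill]
    unfold pvSrcs
    rw [List.filter_cons]
    by_cases h1 : PySem.Str.startswith sd.2 pre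
    · rw [if_pos h1]
      by_cases he : pvSuffix sd.2 pre = field
      · have hc : req.contains (pvSuffix sd.2 pre) = true := he ▸ h
        rw [if_pos hc, pvB_fill_getD_pos pre field rest _ (by rw [PySem.Dict.contains_modify]; simp [he])]
        subst he
        rw [PySem.Dict.getD_modify_self]
        simp only [PySem.Str.startswith] at h1
        simp [h1, pvSrcs]
      · by_cases hc : req.contains (pvSuffix sd.2 pre) = true
        · rw [if_pos hc, pvB_fill_getD_pos pre field rest _ (by rw [PySem.Dict.contains_modify]; simp [h])]
          rw [PySem.Dict.getD_modify_of_ne _ _ _ (fun hh => he hh.symm)]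
          simp [he, pvSrcs]
        · rw [if_neg hc, pvB_fill_getD_pos pre field rest _ h]
          simp [he, pvSrcs]
    · rw [if_neg h1, pvB_fill_getD_pos pre field rest _ h]
      simp only [PySem.Str.startswith] at h1
      simp [h1, pvSrcs]

-- the per-entity dicts agree
theorem pv_ent_eq (fields : List String) (fms : List (String × String)) (pre : String) :
    pvB_fill pre (pvB_init fields) fms = pvA_req fields (pvA_matching fms pre) := by
  have hkB : (pvB_fill pre (pvB_init fields) fms).keys = (pvB_init fields).keys := pvB_fill_keys pre fms _
  have hkA : (pvA_req fields (pvA_matching fms pre)).keys = (pvB_init fields).keys := by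
    unfold pvA_req pvB_init
    rw [PySem.Dict.keys_foldl_insert, PySem.Dict.keys_foldl_insert]
  have hndI : (pvB_init fields).keys.Nodup := PySem.Dict.nodup_keys_foldl_insert _ _ _ PySem.Dict.nodup_keys_empty
  apply PySem.Dict.ext
  rw [PySem.Dict.items_eq_map_keys _ (hkB ▸ hndI) ([] : List String),
      PySem.Dict.items_eq_map_keys _ (hkA ▸ hndI) ([] : List String), hkB, hkA]
  apply List.map_congr_left
  intro k hk
  have hmem : k ∈ fields := by
    unfold pvB_init at hk
    rw [PySem.Dict.keys_foldl_insert] at hk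
    simpa [PySem.Set.mem_update] using hk
  have hcI : (pvB_init fields).contains k = true := by
    unfold pvB_init; rw [pv_foldl_insert_contains]; simp [hmem]
  rw [pvB_fill_getD_pos pre k fms _ hcI]
  unfold pvB_init pvA_req
  rw [pv_foldl_insert_getD, pv_foldl_insert_getD, if_pos hmem, if_pos hmem,
      pvA_sources_eq]
  simp

-- B's outer recursion is A's outer fold
theorem pvB_main_eq (fms : List (String × String)) :
    ∀ (ents : List (String × List String)) (acc : PySem.Dict String (List (String × List String))),
    pvB_main fms ents acc
      = ents.foldl (fun all ed => all.insert ed.1 (pvA_req ed.2 (pvA_matching fms (ed.1 ++ "."))).items) acc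
  | [], acc => rfl
  | ed :: rest, acc => by
    rw [pvB_main, List.foldl_cons, pvB_main_eq fms rest, pv_ent_eq]

-- ===== VERDICT (by name: the statement is the Claim_ definition above) =====
theorem get_entity_requirements_spec : Claim_equal_get_entity_requirements := by
  intro entities field_mappings _
  unfold Spec_get_entity_requirements get_entity_requirements get_entity_requirements_alt
  rw [pvB_main_eq]
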